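-- pv_equiv track=rewrite | github.com/sshreya99/Interview-OA | Prep/amazon_SDE1_redshift/OA Prep/OA4.py | getTotalRequests
-- ===== SOURCE A (Python) =====
-- from typing import List
--
-- def getTotalRequests(server: List[int], replaced: List[int], newId: List[int]) -> List[int]:
--   ans = []
--   for j in range(len(replaced)):
--     for i in range(len(server)):
--       if server[i] == replaced[j]:
--         server[i] = newId[j]
--     ans.append(sum(server))
--   return ans
-- ===== SOURCE B (Python) =====
-- from typing import List
--
-- # Counter + running total: each replacement is a single O(1) delta update
-- # instead of a scan of server.  Note: unlike A, B does not mutate `server`.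
-- def getTotalRequests(server: List[int], replaced: List[int], newId: List[int]) -> List[int]:
--     counts = {}
--     for x in server:
--         counts[x] = counts.get(x, 0) + 1
--     total = sum(server)
--     ans = []
--     for old, new in zip(replaced, newId):
--         c = counts.get(old, 0)
--         if c:
--             total += (new - old) * c
--             counts[old] = 0
--             counts[new] = counts.get(new, 0) + c
--         ans.append(total)
--     return ans
-- ===== Notes on version B (the rewrite author's own statement) =====
-- stated objective: faster
-- what changed: Replaces the per-query scan of server by a value->count dict and a running total updated with one O(1) delta per replacement (B also leaves server unmutated).
-- outside the precondition, e.g. on getTotalRequests([1], [1, 2], [2]): A raises IndexError, B returns [2]; on getTotalRequests([5], [1, 2], []): A returns [5, 5], B returns []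
import Mathlib
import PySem

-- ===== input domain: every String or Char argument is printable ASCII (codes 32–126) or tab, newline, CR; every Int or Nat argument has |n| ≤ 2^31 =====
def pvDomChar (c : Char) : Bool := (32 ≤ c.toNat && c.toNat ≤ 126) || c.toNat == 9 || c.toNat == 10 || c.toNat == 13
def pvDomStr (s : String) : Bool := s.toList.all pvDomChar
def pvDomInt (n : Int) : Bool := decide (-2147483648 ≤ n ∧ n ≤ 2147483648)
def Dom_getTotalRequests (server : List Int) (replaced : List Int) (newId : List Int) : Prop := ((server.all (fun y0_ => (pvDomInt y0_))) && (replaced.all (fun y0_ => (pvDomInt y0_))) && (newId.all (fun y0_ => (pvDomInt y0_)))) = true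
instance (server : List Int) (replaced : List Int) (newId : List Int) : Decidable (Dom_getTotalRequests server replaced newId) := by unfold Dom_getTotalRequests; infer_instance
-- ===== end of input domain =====

-- B replaces A's per-query scan of `server` by a value→count dict plus a running
-- total updated by one delta per replacement (asymptotically faster per the timing
-- run).  A mutates its `server` argument in place; B does not — the equivalence
-- proved here is about the return value only.

-- ===== PORT A =====
-- inner loop: for i in range(len(server)): if server[i]==r: server[i]=n
def replaceAll : List Int → Int → Int → List Int
  | [], _, _ => []
  | x :: xs, r, n => (if x = r then n else x) :: replaceAll xs r n

-- outer loop over j (replaced[j], newId[j]); the newId-exhausted case is outside Pre_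
def aLoop : List Int → List Int → List Int → List Int
  | _, [], _ => []
  | _, _ :: _, [] => []
  | s, r :: rs, n :: ns =>
    let s' := replaceAll s r n
    s'.sum :: aLoop s' rs ns

def getTotalRequests (server : List Int) (replaced : List Int) (newId : List Int) : List Int :=
  aLoop server replaced newId

-- ===== PORT B =====
def altLoop : PySem.Dict Int Int → Int → List (Int × Int) → List Int
  | _, _, [] => []
  | d, total, (old, nw) :: rest =>
    let c := d.getD old 0
    if c ≠ 0 then
      let total' := total + (nw - old) * c
      let d1 := d.insert old 0
      let d' := d1.insert nw (d1.getD nw 0 + c)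
      total' :: altLoop d' total' rest
    else
      total :: altLoop d total rest

def getTotalRequests_alt (server : List Int) (replaced : List Int) (newId : List Int) : List Int :=
  let counts := server.foldl (fun d x => d.insert x (d.getD x 0 + 1)) PySem.Dict.empty
  altLoop counts server.sum (replaced.zip newId)

-- ===== PRECONDITION & SPEC =====
-- Pre_ excludes inputs with len(replaced) > len(newId): there A raises IndexError as
-- soon as a query past the end of newId matches some current server element (whether
-- it raises at all depends on the run-time data, not on the shape of the input).
def Pre_getTotalRequests (_server : List Int) (replaced : List Int) (newId : List Int) : Prop :=
  replaced.length ≤ newId.length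
instance (server : List Int) (replaced : List Int) (newId : List Int) : Decidable (Pre_getTotalRequests server replaced newId) := by unfold Pre_getTotalRequests; infer_instance

def pvWitness_getTotalRequests : List Int × List Int × List Int := ([1, 2, 1], [1, 3], [5, 2])

def Spec_getTotalRequests (server : List Int) (replaced : List Int) (newId : List Int) (out : List Int) : Prop := out = getTotalRequests_alt server replaced newId
instance (server : List Int) (replaced : List Int) (newId : List Int) (out : List Int) : Decidable (Spec_getTotalRequests server replaced newId out) := by unfold Spec_getTotalRequests; infer_instance

-- ===== CLAIM (what is proved, stated in full; the proofs are below) =====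
def Claim_equal_getTotalRequests : Prop := ∀ (server : List Int) (replaced : List Int) (newId : List Int), Dom_getTotalRequests server replaced newId → Pre_getTotalRequests server replaced newId → Spec_getTotalRequests server replaced newId (getTotalRequests server replaced newId)

-- ===== LEMMAS AND PROOFS =====

theorem replaceAll_self (s : List Int) (r : Int) : replaceAll s r r = s := by
  induction s with
  | nil => rfl
  | cons x xs ih => simp [replaceAll, ih]; intro h; omega

theorem replaceAll_of_count_zero (s : List Int) (r n : Int) (h : s.count r = 0) :
    replaceAll s r n = s := by
  induction s with
  | nil => rfl
  | cons x xs ih =>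
    rw [List.count_cons] at h
    by_cases hx : x = r
    · simp [hx] at h
    · simp [replaceAll, hx, ih (by omega)]

theorem sum_replaceAll (s : List Int) (r n : Int) :
    (replaceAll s r n).sum = s.sum + (n - r) * (s.count r : Int) := by
  induction s with
  | nil => simp [replaceAll]
  | cons x xs ih =>
    rw [List.count_cons]
    by_cases hx : x = r
    · simp [replaceAll, hx, ih]; ring
    · simp [replaceAll, hx, ih]; ring

theorem count_replaceAll_old (s : List Int) (r n : Int) (hrn : r ≠ n) :
    (replaceAll s r n).count r = 0 := by
  induction s with
  | nil => rfl
  | cons x xs ih =>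
    by_cases hx : x = r
    · simpa [replaceAll, hx, List.count_cons, Ne.symm hrn] using ih
    · simpa [replaceAll, hx, List.count_cons, hx] using ih

theorem count_replaceAll_new (s : List Int) (r n : Int) (hrn : r ≠ n) :
    (replaceAll s r n).count n = s.count n + s.count r := by
  induction s with
  | nil => rfl
  | cons x xs ih =>
    by_cases hx : x = r
    · simp [replaceAll, hx, hrn, ih]; omega
    · by_cases hn : x = n
      · subst hn
        simp [replaceAll, hx, ih]
        omega
      · simp [replaceAll, hx, hn, ih]

theorem count_replaceAll_other (s : List Int) (r n x : Int) (hxr : x ≠ r) (hxn : x ≠ n) :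
    (replaceAll s r n).count x = s.count x := by
  induction s with
  | nil => rfl
  | cons y ys ih =>
    by_cases hy : y = r
    · simp [replaceAll, hy, Ne.symm hxn, Ne.symm hxr, ih]
    · simp [replaceAll, hy, List.count_cons, ih]

theorem altLoop_eq (rs : List Int) (ns : List Int) (s : List Int)
    (d : PySem.Dict Int Int) (total : Int)
    (hlen : rs.length ≤ ns.length)
    (hd : ∀ x, d.getD x 0 = (s.count x : Int))
    (ht : total = s.sum) :
    aLoop s rs ns = altLoop d total (rs.zip ns) := by
  induction rs generalizing ns s d total with
  | nil => cases ns <;> rfl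
  | cons r rs' ih =>
    cases ns with
    | nil => simp at hlen
    | cons n ns' =>
      simp only [List.zip_cons_cons, aLoop, altLoop]
      rw [hd r]
      by_cases hc : s.count r = 0
      · simp only [hc, Int.natCast_zero, ne_eq, not_true_eq_false, if_false]
        rw [replaceAll_of_count_zero s r n hc, ht]
        exact congrArg _ (ih ns' s d s.sum (by simpa using hlen) hd rfl)
      · have hc' : ((s.count r : Int) ≠ 0) := by exact_mod_cast hc
        simp only [hc', ne_eq, not_false_eq_true, if_true]
        have hsum : (replaceAll s r n).sum = total + (n - r) * (s.count r : Int) := by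
          rw [sum_replaceAll, ht]
        refine congrArg₂ _ hsum ?_
        refine ih ns' (replaceAll s r n) _ _ (by simpa using hlen) ?_ hsum.symm
        intro x
        by_cases hrn : r = n
        · subst hrn
          rw [replaceAll_self, PySem.Dict.insert_insert_self]
          by_cases hx : x = r
          · subst hx
            rw [PySem.Dict.getD_insert_self, PySem.Dict.getD_insert_self]
            simp
          · rw [PySem.Dict.getD_insert_of_ne _ _ _ hx, hd]
        · by_cases hxn : x = n
          · subst hxn
            rw [PySem.Dict.getD_insert_self,
                PySem.Dict.getD_insert_of_ne _ _ _ (Ne.symm hrn), hd,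
                count_replaceAll_new s r x hrn]
            push_cast; ring
          · by_cases hxr : x = r
            · subst hxr
              rw [PySem.Dict.getD_insert_of_ne _ _ _ hxn,
                  PySem.Dict.getD_insert_self,
                  count_replaceAll_old s x n hrn]
              simp
            · rw [PySem.Dict.getD_insert_of_ne _ _ _ hxn,
                  PySem.Dict.getD_insert_of_ne _ _ _ hxr, hd,
                  count_replaceAll_other s r n x hxr hxn]

-- ===== VERDICT (by name: the statement is the Claim_ definition above) =====
theorem getTotalRequests_spec : Claim_equal_getTotalRequests := by
  intro server replaced newId _ hpre
  unfold Spec_getTotalRequests getTotalRequests getTotalRequests_alt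
  rw [PySem.Dict.foldl_insert_getD_add_one_eq_counter]
  exact altLoop_eq replaced newId server _ _ hpre
    (fun x => PySem.Dict.getD_counter server x) rfl
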